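-- pv_equiv track=rewrite | github.com/griverorz/promotions | src/helpers.py | generate_level_codes
-- ===== SOURCE A (Python) =====
-- import itertools
--
-- def generate_level_codes(units, depth, unitsize):
--     tree = list([0]*units)
--     for i in range(units):
--         tree[i] = list(itertools.product(range(unitsize), repeat=depth))
--         tree[i] = [(i, ) + j for j in tree[i]]
--         i += 1
--     tree = [l for sublist in list(tree) for l in sublist]
--     return tree
-- ===== SOURCE B (Python) =====
-- import itertools
--
-- def generate_level_codes(units, depth, unitsize):
--     if units <= 0:
--         return []
--     return list(itertools.product(range(units), *[range(unitsize)] * depth))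
-- ===== Notes on version B (the rewrite author's own statement) =====
-- stated objective: simpler
-- what changed: Replaces the per-unit loop with prepend-and-flatten by a single itertools.product call whose leftmost factor is range(units), yielding the tuples directly in the same order.
import Mathlib
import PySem

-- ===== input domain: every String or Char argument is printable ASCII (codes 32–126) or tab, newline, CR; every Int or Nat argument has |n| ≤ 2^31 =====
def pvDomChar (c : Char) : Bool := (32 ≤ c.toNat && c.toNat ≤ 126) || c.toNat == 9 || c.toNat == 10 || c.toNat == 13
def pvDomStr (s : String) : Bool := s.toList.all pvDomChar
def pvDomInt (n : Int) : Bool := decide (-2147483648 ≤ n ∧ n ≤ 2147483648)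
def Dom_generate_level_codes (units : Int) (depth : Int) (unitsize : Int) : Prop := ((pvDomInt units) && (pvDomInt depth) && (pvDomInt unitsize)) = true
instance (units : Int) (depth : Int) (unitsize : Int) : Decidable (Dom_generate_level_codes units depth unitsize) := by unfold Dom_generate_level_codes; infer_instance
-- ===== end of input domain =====

-- B replaces A's per-unit loop with prepend-and-flatten by one cartesian product whose
-- leftmost factor is range(units); same order, same cost (objective: simpler).

-- ===== PORT A =====
-- itertools.product(range(unitsize), repeat=d): d copies of range(unitsize), rightmost fastest
def pvProdRep (unitsize : Int) : Nat → List (List Int)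
  | 0 => [[]]
  | d + 1 => (PySem.List.pyRange 0 unitsize 1).flatMap (fun x => (pvProdRep unitsize d).map (fun t => x :: t))

def generate_level_codes (units : Int) (depth : Int) (unitsize : Int) : List (List Int) :=
  -- tree[i] = product(range(unitsize), repeat=depth), then prepend i; finally flatten
  -- (Python raises for depth < 0 with units > 0; Pre_ excludes that, toNat clamps here)
  let tree := (PySem.List.pyRange 0 units 1).map
    (fun i => (pvProdRep unitsize depth.toNat).map (fun j => i :: j))
  tree.flatten

-- ===== PORT B =====
-- itertools.product over an explicit list of factors, leftmost slowest
def pvProduct : List (List Int) → List (List Int)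
  | [] => [[]]
  | f :: rest => f.flatMap (fun x => (pvProduct rest).map (fun t => x :: t))

def generate_level_codes_alt (units : Int) (depth : Int) (unitsize : Int) : List (List Int) :=
  if units ≤ 0 then []
  else pvProduct (PySem.List.pyRange 0 units 1 :: List.replicate depth.toNat (PySem.List.pyRange 0 unitsize 1))

-- ===== PRECONDITION & SPEC =====
-- Pre_ excludes exactly the inputs where A raises ValueError (negative repeat reached):
def Pre_generate_level_codes (units : Int) (depth : Int) (unitsize : Int) : Prop :=
  0 ≤ depth ∨ units ≤ 0
instance (units : Int) (depth : Int) (unitsize : Int) : Decidable (Pre_generate_level_codes units depth unitsize) := by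
  unfold Pre_generate_level_codes; infer_instance

def pvWitness_generate_level_codes : Int × Int × Int := (2, 2, 3)

def Spec_generate_level_codes (units : Int) (depth : Int) (unitsize : Int) (out : List (List Int)) : Prop := out = generate_level_codes_alt units depth unitsize
instance (units : Int) (depth : Int) (unitsize : Int) (out : List (List Int)) : Decidable (Spec_generate_level_codes units depth unitsize out) := by unfold Spec_generate_level_codes; infer_instance

-- ===== CLAIM (what is proved, stated in full; the proofs are below) =====
def Claim_equal_generate_level_codes : Prop := ∀ (units : Int) (depth : Int) (unitsize : Int), Dom_generate_level_codes units depth unitsize → Pre_generate_level_codes units depth unitsize → Spec_generate_level_codes units depth unitsize (generate_level_codes units depth unitsize)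

-- ===== LEMMAS AND PROOFS =====
lemma pvProdRep_eq_product (unitsize : Int) (d : Nat) :
    pvProdRep unitsize d = pvProduct (List.replicate d (PySem.List.pyRange 0 unitsize 1)) := by
  induction d with
  | zero => rfl
  | succ n ih => simp [pvProdRep, pvProduct, List.replicate_succ, ih]

-- ===== VERDICT (by name: the statement is the Claim_ definition above) =====
theorem generate_level_codes_spec : Claim_equal_generate_level_codes := by
  intro units depth unitsize _ _
  unfold Spec_generate_level_codes generate_level_codes generate_level_codes_alt pvProduct
  by_cases h : units ≤ 0
  · simp [h, PySem.List.pyRange, show ¬ (0:Int) < units by omega]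
  · simp [h, pvProdRep_eq_product, List.flatMap]
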